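-- pv_equiv track=rewrite | github.com/biopython/biopython | Bio/SearchIO/ExonerateIO/exonerate_text.py | _get_inter_coords
-- ===== SOURCE A (Python) =====
-- from itertools import chain
--
-- def _get_inter_coords(coords, strand=1):
--     """Return list of pairs covering intervening ranges (PRIVATE).
--
--     From the given pairs of coordinates, returns a list of pairs
--     covering the intervening ranges.
--     """
--     # adapted from Python's itertools guide
--     # if strand is -1, adjust coords to the ends and starts are chained
--     if strand == -1:
--         sorted_coords = [(max(a, b), min(a, b)) for a, b in coords]
--         inter_coords = list(chain(*sorted_coords))[1:-1]
--         return list(zip(inter_coords[1::2], inter_coords[::2]))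
--     else:
--         inter_coords = list(chain(*coords))[1:-1]
--         return list(zip(inter_coords[::2], inter_coords[1::2]))
-- ===== SOURCE B (Python) =====
-- def _get_inter_coords(coords, strand=1):
--     """Return list of pairs covering intervening ranges (PRIVATE)."""
--     if strand == -1:
--         return [(max(b), min(a)) for a, b in zip(coords, coords[1:])]
--     return [(a[1], b[0]) for a, b in zip(coords, coords[1:])]
-- ===== Notes on version B (the rewrite author's own statement) =====
-- stated objective: simpler
-- what changed: Replaced the chain-flatten / drop-ends / dual strided-slice trick with a single comprehension over consecutive coordinate pairs (zip(coords, coords[1:])), emitting (a[1], b[0]) forward and (max(b), min(a)) for strand -1.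
import Mathlib
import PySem

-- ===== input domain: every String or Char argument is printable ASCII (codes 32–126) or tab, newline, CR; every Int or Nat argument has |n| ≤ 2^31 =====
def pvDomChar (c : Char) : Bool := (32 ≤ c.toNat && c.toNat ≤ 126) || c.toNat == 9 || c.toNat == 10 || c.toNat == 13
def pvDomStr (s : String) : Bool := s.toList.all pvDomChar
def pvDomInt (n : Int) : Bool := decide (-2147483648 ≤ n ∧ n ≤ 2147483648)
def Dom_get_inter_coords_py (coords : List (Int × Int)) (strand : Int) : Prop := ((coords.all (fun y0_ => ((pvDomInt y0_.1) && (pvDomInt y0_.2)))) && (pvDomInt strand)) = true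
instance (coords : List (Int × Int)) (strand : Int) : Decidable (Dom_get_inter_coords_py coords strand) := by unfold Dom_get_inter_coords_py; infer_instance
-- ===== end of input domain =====

-- B replaces A's flatten / [1:-1] / strided-slice trick by a single pairwise pass over
-- consecutive coordinate pairs (objective: simpler).

-- ===== PORT A =====
def get_inter_coords_py (coords : List (Int × Int)) (strand : Int) : List (Int × Int) :=
  if strand = -1 then
    let sorted_coords := coords.map (fun p => (max p.1 p.2, min p.1 p.2))
    let inter_coords := PySem.List.slice (sorted_coords.flatMap (fun p => [p.1, p.2])) (some 1) (some (-1))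
    -- zip(inter_coords[1::2], inter_coords[::2]); step 2 ≠ 0, so slice? never returns none
    List.zip ((PySem.List.slice? inter_coords (some 1) none 2).getD []) ((PySem.List.slice? inter_coords none none 2).getD [])
  else
    let inter_coords := PySem.List.slice (coords.flatMap (fun p => [p.1, p.2])) (some 1) (some (-1))
    List.zip ((PySem.List.slice? inter_coords none none 2).getD []) ((PySem.List.slice? inter_coords (some 1) none 2).getD [])

-- ===== PORT B =====
def get_inter_coords_py_alt (coords : List (Int × Int)) (strand : Int) : List (Int × Int) :=
  if strand = -1 then
    (coords.zip coords.tail).map (fun p => (max p.2.1 p.2.2, min p.1.1 p.1.2))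
  else
    (coords.zip coords.tail).map (fun p => (p.1.2, p.2.1))

-- ===== PRECONDITION & SPEC =====
def Spec_get_inter_coords_py (coords : List (Int × Int)) (strand : Int) (out : List (Int × Int)) : Prop := out = get_inter_coords_py_alt coords strand
instance (coords : List (Int × Int)) (strand : Int) (out : List (Int × Int)) : Decidable (Spec_get_inter_coords_py coords strand out) := by unfold Spec_get_inter_coords_py; infer_instance

-- ===== CLAIM (what is proved, stated in full; the proofs are below) =====
def Claim_equal_get_inter_coords_py : Prop := ∀ (coords : List (Int × Int)) (strand : Int), Dom_get_inter_coords_py coords strand → Spec_get_inter_coords_py coords strand (get_inter_coords_py coords strand)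

-- ===== LEMMAS AND PROOFS =====

/-- Every second element (`xs[::2]`). -/
def pvEvens {α : Type} : List α → List α
  | [] => []
  | [x] => [x]
  | x :: _ :: l => x :: pvEvens l

theorem pvEvens_cons_tail {α : Type} (a : α) (l : List α) :
    pvEvens (a :: l) = a :: pvEvens l.tail := by
  cases l <;> rfl

theorem filterMap_stride {α : Type} (xs : List α) :
    (List.range ((xs.length + 1) / 2)).filterMap (fun k => xs[2*k]?) = pvEvens xs := by
  induction xs using pvEvens.induct with
  | case1 => simp [pvEvens]
  | case2 x => simp [pvEvens, List.range_succ]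
  | case3 x y l ih =>
    have hc : (l.length + 2 + 1) / 2 = (l.length + 1) / 2 + 1 := by omega
    simp only [List.length_cons, hc, List.range_succ_eq_map, List.filterMap_cons,
      List.filterMap_map]
    simp only [Nat.mul_zero, List.getElem?_cons_zero, pvEvens]
    refine congrArg (x :: ·) ?_
    rw [← ih]
    apply List.filterMap_congr
    intro k _
    have : 2 * Nat.succ k = 2 * k + 1 + 1 := by omega
    simp [Function.comp, this, List.getElem?_cons_succ]

/-- `xs[::2]` as a PySem strided slice. -/
theorem slice?_two {α : Type} (xs : List α) :
    PySem.List.slice? xs none none 2 = some (pvEvens xs) := by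
  simp only [PySem.List.slice?, PySem.List.sliceIndices]
  norm_num
  rw [show (if 0 < xs.length then (((xs.length : Int) + 2 - 1) / 2).toNat else 0) = (xs.length + 1) / 2 from by split_ifs <;> omega]
  rw [← filterMap_stride]
  apply List.filterMap_congr
  intro k _
  have : ((2 * (k:ℤ)).toNat) = 2 * k := by omega
  simp [this]

/-- `xs[1::2]` as a PySem strided slice. -/
theorem slice?_one_two {α : Type} (xs : List α) :
    PySem.List.slice? xs (some 1) none 2 = some (pvEvens xs.tail) := by
  cases xs with
  | nil => simp [PySem.List.slice?, PySem.List.sliceIndices, pvEvens]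
  | cons x t =>
    simp only [PySem.List.slice?, PySem.List.sliceIndices]
    norm_num
    rw [show (if 0 < t.length then (((t.length:Int) + 2 - 1) / 2).toNat else 0) = (t.length + 1) / 2 from by split_ifs <;> omega]
    rw [← filterMap_stride t]
    apply List.filterMap_congr
    intro k _
    rw [show ((1 + 2 * (k:Int)).toNat) = 2 * k + 1 from by omega]
    simp

/-- `xs[1:-1]` is tail-then-dropLast. -/
theorem slice_one_neg_one {α : Type} (xs : List α) :
    PySem.List.slice xs (some 1) (some (-1)) = xs.tail.dropLast := by
  cases xs with
  | nil => rfl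
  | cons x t =>
    simp [PySem.List.slice, PySem.List.clampIdx, List.dropLast_eq_take]
    split_ifs with h
    · omega
    · omega

/-- A's intervening list: flatten, drop first and last. -/
def pvInter (q : List (Int × Int)) : List Int :=
  (q.flatMap (fun p => [p.1, p.2])).tail.dropLast

theorem pvInter_cons (c d : Int × Int) (rest : List (Int × Int)) :
    pvInter (c :: d :: rest) = c.2 :: d.1 :: pvInter (d :: rest) := rfl

theorem pvE_lem (c : Int × Int) (rest : List (Int × Int)) :
    pvEvens (pvInter (c :: rest)) = (List.zip (c :: rest) rest).map (fun p => p.1.2) := by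
  induction rest generalizing c with
  | nil => rfl
  | cons d rest ih =>
    rw [pvInter_cons, pvEvens_cons_tail]
    simp only [List.tail_cons, ih d, List.zip_cons_cons, List.map_cons]

theorem pvO_lem (c : Int × Int) (rest : List (Int × Int)) :
    pvEvens (pvInter (c :: rest)).tail = (List.zip (c :: rest) rest).map (fun p => p.2.1) := by
  induction rest generalizing c with
  | nil => rfl
  | cons d rest ih =>
    rw [pvInter_cons]
    simp only [List.tail_cons, pvEvens_cons_tail, List.tail_cons, ih d,
      List.zip_cons_cons, List.map_cons]

-- ===== VERDICT (by name: the statement is the Claim_ definition above) =====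
theorem get_inter_coords_py_spec : Claim_equal_get_inter_coords_py := by
  intro coords strand _
  unfold Spec_get_inter_coords_py get_inter_coords_py get_inter_coords_py_alt
  by_cases hs : strand = -1 <;> simp only [hs, reduceIte]
  · cases coords with
    | nil => rfl
    | cons c rest =>
      rw [slice_one_neg_one]
      rw [show ((((c :: rest).map (fun p => (max p.1 p.2, min p.1 p.2))).flatMap (fun p => [p.1, p.2])).tail.dropLast) = pvInter ((max c.1 c.2, min c.1 c.2) :: rest.map (fun p => (max p.1 p.2, min p.1 p.2))) from rfl]
      rw [slice?_two, slice?_one_two]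
      simp only [Option.getD_some]
      rw [pvO_lem, pvE_lem, List.zip_map']
      rw [show (List.zip ((max c.1 c.2, min c.1 c.2) :: rest.map (fun p => (max p.1 p.2, min p.1 p.2))) (rest.map (fun p => (max p.1 p.2, min p.1 p.2)))) = List.map (Prod.map (fun p => ((max p.1 p.2 : Int), (min p.1 p.2 : Int))) (fun p => ((max p.1 p.2 : Int), (min p.1 p.2 : Int)))) ((c :: rest).zip rest) from by
        rw [show ((max c.1 c.2, min c.1 c.2) :: rest.map (fun p => (max p.1 p.2, min p.1 p.2))) = (c :: rest).map (fun p => ((max p.1 p.2 : Int), (min p.1 p.2 : Int))) from rfl]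
        exact List.zip_map]
      rw [List.map_map, List.tail_cons]
      rfl
  · cases coords with
    | nil => rfl
    | cons c rest =>
      rw [slice_one_neg_one]
      rw [show ((((c :: rest).flatMap (fun p => [p.1, p.2])).tail.dropLast)) = pvInter (c :: rest) from rfl]
      rw [slice?_two, slice?_one_two]
      simp only [Option.getD_some]
      rw [pvE_lem, pvO_lem, List.zip_map', List.tail_cons]
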